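-- pv_equiv track=rewrite | github.com/victorsimrbt/britishinformaticsolympiad | 2018/q2.py | generate_dial
-- ===== SOURCE A (Python) =====
-- import string
--
-- def generate_dial(n):
--     alphabet = list(string.ascii_uppercase)
--     dial = []
--     start = -1
--
--     for i in range(26):
--         start = (n+start)%len(alphabet)
--         new_letter = alphabet[start]
--         alphabet.pop(start)
--         start-=1
--         dial.append(new_letter)
--     return dial
-- ===== SOURCE B (Python) =====
-- import string
-- from collections import deque
--
-- def generate_dial(n):
--     dq = deque(string.ascii_uppercase)
--     dial = []
--     for _ in range(26):
--         dq.rotate(-((n - 1) % len(dq)))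
--         dial.append(dq.popleft())
--     return dial
-- ===== Notes on version B (the rewrite author's own statement) =====
-- stated objective: idiomatic
-- what changed: Replaces the mutable list with explicit start-index arithmetic (and the start-=1 correction) by a collections.deque that is rotated left by (n-1) mod len each round and popped from the front.
import Mathlib
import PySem

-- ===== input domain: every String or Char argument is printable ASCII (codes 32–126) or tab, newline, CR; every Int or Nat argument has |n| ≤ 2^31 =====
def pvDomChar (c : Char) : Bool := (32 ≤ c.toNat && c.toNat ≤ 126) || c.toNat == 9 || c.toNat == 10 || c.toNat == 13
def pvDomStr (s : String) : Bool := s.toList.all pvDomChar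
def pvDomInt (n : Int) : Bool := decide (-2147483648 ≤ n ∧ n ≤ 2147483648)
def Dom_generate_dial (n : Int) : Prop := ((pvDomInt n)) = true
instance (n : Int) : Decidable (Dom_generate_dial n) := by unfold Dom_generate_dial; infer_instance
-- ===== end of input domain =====

-- B replaces A's start-index arithmetic over a shrinking list by rotating a deque
-- left by (n-1) mod len and popping the front each round (idiomatic; return value only).


-- list(string.ascii_uppercase): 26 one-character strings
def pyAsciiUppercase : List String :=
  ["A","B","C","D","E","F","G","H","I","J","K","L","M",
   "N","O","P","Q","R","S","T","U","V","W","X","Y","Z"]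

-- ===== PORT A =====
-- one iteration of A's for-loop; state = (alphabet, dial, start)
def dialStepA (n : Int) (st : List String × List String × Int) :
    List String × List String × Int :=
  let start := PySem.Int.mod (n + st.2.2) (st.1.length : Int)
  match PySem.List.pop? st.1 start with   -- alphabet[start] then alphabet.pop(start)
  | some (new_letter, alphabet') => (alphabet', st.2.1 ++ [new_letter], start - 1)
  | none => st                            -- unreachable: start is in range

def generate_dial (n : Int) : List String :=
  ((List.range 26).foldl (fun st _ => dialStepA n st) (pyAsciiUppercase, [], -1)).2.1

-- ===== PORT B =====
-- the for-loop of Source B: rotate the deque left by (n-1) % len, popleft, append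
def dialLoopB (n : Int) : Nat → List String → List String → List String
  | 0, _, dial => dial
  | k+1, dq, dial =>
    let r := (PySem.Int.mod (n - 1) (dq.length : Int)).toNat
    match dq.drop r ++ dq.take r with     -- dq.rotate(-r)
    | [] => dial                          -- unreachable: dq is nonempty
    | x :: rest => dialLoopB n k rest (dial ++ [x])   -- x = dq.popleft()

def generate_dial_alt (n : Int) : List String :=
  dialLoopB n 26 pyAsciiUppercase []

-- ===== PRECONDITION & SPEC =====
def Spec_generate_dial (n : Int) (out : List String) : Prop := out = generate_dial_alt n
instance (n : Int) (out : List String) : Decidable (Spec_generate_dial n out) := by unfold Spec_generate_dial; infer_instance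

-- ===== CLAIM (what is proved, stated in full; the proofs are below) =====
def Claim_equal_generate_dial : Prop := ∀ (n : Int), Dom_generate_dial n → Spec_generate_dial n (generate_dial n)

-- ===== LEMMAS AND PROOFS =====

lemma foldl_range_const {α : Type} (f : α → α) (x : α) (k : Nat) :
    (List.range k).foldl (fun s _ => f s) x = f^[k] x := by
  induction k with
  | zero => simp
  | succ k ih =>
    rw [List.range_succ, List.foldl_append, ih, Function.iterate_succ_apply']
    simp

-- popping the element a rotation brought to the front = erase it and keep the rotation
lemma tail_rotate_eraseIdx {α : Type} (l : List α) (s : Nat) (hs : s < l.length) :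
    (l.rotate s).tail = (l.eraseIdx s).rotate s := by
  rw [List.rotate_eq_drop_append_take hs.le,
      List.rotate_eq_drop_append_take (by rw [List.length_eraseIdx_of_lt hs]; omega),
      List.eraseIdx_eq_take_drop_succ]
  have htake : (l.take s).length = s := List.length_take_of_le hs.le
  have hdropne : l.drop s ≠ [] := by
    intro h
    have := List.length_drop (l := l) (i := s)
    rw [h] at this
    simp at this; omega
  rw [List.tail_append_of_ne_nil hdropne, List.tail_drop]
  rw [show (l.take s ++ l.drop (s+1)).drop s = l.drop (s+1) by
        rw [← htake]; simp,
      show (l.take s ++ l.drop (s+1)).take s = l.take s by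
        rw [← htake]; simp]

lemma dial_main (n : Int) (k : Nat) (l dial : List String) (q : Nat)
    (hk : k ≤ l.length) (hq : q ≤ l.length) :
    ((dialStepA n)^[k] (l, dial, (q : Int) - 1)).2.1 = dialLoopB n k (l.rotate q) dial := by
  induction k generalizing l dial q with
  | zero => simp [dialLoopB]
  | succ k ih =>
    have hL : 0 < l.length := by omega
    have hLI : (0 : Int) < (l.length : Int) := by exact_mod_cast hL
    obtain ⟨s, hsdef, hs0, hsL⟩ :
        ∃ s : Int, (n + ((q : Int) - 1)) % ((l.length : Int)) = s ∧ 0 ≤ s ∧ s < (l.length : Int) :=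
      ⟨_, rfl, Int.emod_nonneg _ (by omega), Int.emod_lt_of_pos _ hLI⟩
    have hsN : s.toNat < l.length := by omega
    have hscast : ((s.toNat : Nat) : Int) = s := Int.toNat_of_nonneg hs0
    obtain ⟨r, hrdef, hrL⟩ :
        ∃ r : Nat, ((n - 1) % ((l.length : Int))).toNat = r ∧ r < l.length := by
      refine ⟨_, rfl, ?_⟩
      have h1 := Int.emod_nonneg (n - 1) (show (l.length : Int) ≠ 0 by omega)
      have h2 := Int.emod_lt_of_pos (n - 1) hLI
      omega
    have hrcast : ((r : Nat) : Int) = (n - 1) % (l.length : Int) := by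
      rw [← hrdef]; exact Int.toNat_of_nonneg (Int.emod_nonneg _ (by omega))
    -- (q + r) % l.length = s.toNat
    have hkey : (q + r) % l.length = s.toNat := by
      have h1 : (((q + r) % l.length : Nat) : Int) = ((q : Int) + (r : Int)) % (l.length : Int) := by
        push_cast; rfl
      have h2 : ((q : Int) + (r : Int)) % (l.length : Int) = s := by
        rw [hrcast, ← hsdef, Int.add_emod ((q : Int)) ((n - 1) % (l.length : Int)) (l.length : Int),
            Int.emod_emod_of_dvd _ dvd_rfl, ← Int.add_emod]
        have harith : (q : Int) + (n - 1) = n + ((q : Int) - 1) := by ring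
        rw [harith]
      omega
    -- the rotated deque
    have hrot : (l.rotate q).drop r ++ (l.rotate q).take r = l.rotate (q + r) := by
      rw [← List.rotate_eq_drop_append_take (by rw [List.length_rotate]; omega),
          List.rotate_rotate]
    have hrotmod : l.rotate (q + r) = l.rotate s.toNat := by
      rw [← List.rotate_mod, hkey]
    have hne : l.rotate s.toNat ≠ [] := by
      intro h
      have h' := List.length_rotate (l := l) (n := s.toNat)
      rw [h] at h'
      simp at h'; omega
    obtain ⟨x, rest, hcons⟩ := List.exists_cons_of_ne_nil hne
    have hx : x = l[s.toNat] := by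
      have h0 := List.head?_rotate (l := l) (n := s.toNat) hsN
      rw [hcons, List.head?_cons, List.getElem?_eq_getElem hsN] at h0
      exact Option.some.inj h0
    have hrest : rest = (l.eraseIdx s.toNat).rotate s.toNat := by
      have h0 := tail_rotate_eraseIdx l s.toNat hsN
      rw [hcons] at h0
      simpa using h0
    -- one step of A
    have hpop : PySem.List.pop? l s = some (l[s.toNat], l.eraseIdx s.toNat) := by
      have h0 := PySem.List.pop?_natCast l s.toNat hsN
      rwa [hscast] at h0
    have hstepA : dialStepA n (l, dial, (q : Int) - 1) =
        (l.eraseIdx s.toNat, dial ++ [l[s.toNat]], s - 1) := by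
      simp only [dialStepA, PySem.Int.mod_eq_emod_of_pos hLI, hsdef, hpop]
    -- one step of B
    have hstepB : dialLoopB n (k + 1) (l.rotate q) dial =
        dialLoopB n k ((l.eraseIdx s.toNat).rotate s.toNat) (dial ++ [l[s.toNat]]) := by
      simp only [dialLoopB, List.length_rotate, PySem.Int.mod_eq_emod_of_pos hLI, hrdef, hrot,
        hrotmod, hcons, hx, hrest]
    rw [Function.iterate_succ_apply, hstepA, hstepB,
        show s - 1 = ((s.toNat : Nat) : Int) - 1 by omega]
    exact ih (l.eraseIdx s.toNat) (dial ++ [l[s.toNat]]) s.toNat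
      (by rw [List.length_eraseIdx_of_lt hsN]; omega)
      (by rw [List.length_eraseIdx_of_lt hsN]; omega)

-- ===== VERDICT (by name: the statement is the Claim_ definition above) =====
theorem generate_dial_spec : Claim_equal_generate_dial := by
  intro n _
  unfold Spec_generate_dial generate_dial generate_dial_alt
  rw [foldl_range_const]
  have h := dial_main n 26 pyAsciiUppercase [] 0 (by decide) (by decide)
  simpa [pyAsciiUppercase] using h
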